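-- pv_equiv track=rewrite | github.com/longmatys/Advent-of-Code-2015 | day 11.py | valid_test3
-- ===== SOURCE A (Python) =====
-- def valid_test3(pass_array):
--     last_char = None
--     dvojic = 0
--     for i in range(len(pass_array)):
--         if last_char == pass_array[i]:
--             dvojic+= 1
--             last_char = None
--         else:
--             last_char = pass_array[i]
--     return dvojic > 1
-- ===== SOURCE B (Python) =====
-- def valid_test3(pass_array):
--     # Run-length decomposition: each maximal run of L equal elements
--     # contributes L // 2 non-overlapping pairs; one outer step per run.
--     total = 0
--     i = 0
--     n = len(pass_array)
--     while i < n: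
--         j = i + 1
--         while j < n and pass_array[j] == pass_array[i]:
--             j += 1
--         total += (j - i) // 2
--         i = j
--     return total > 1
-- ===== Notes on version B (the rewrite author's own statement) =====
-- stated objective: simpler
-- what changed: Replaces the greedy last-char/reset toggle state machine by a run-length decomposition: split the list into maximal runs of equal elements and sum length // 2 per run.
import Mathlib
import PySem

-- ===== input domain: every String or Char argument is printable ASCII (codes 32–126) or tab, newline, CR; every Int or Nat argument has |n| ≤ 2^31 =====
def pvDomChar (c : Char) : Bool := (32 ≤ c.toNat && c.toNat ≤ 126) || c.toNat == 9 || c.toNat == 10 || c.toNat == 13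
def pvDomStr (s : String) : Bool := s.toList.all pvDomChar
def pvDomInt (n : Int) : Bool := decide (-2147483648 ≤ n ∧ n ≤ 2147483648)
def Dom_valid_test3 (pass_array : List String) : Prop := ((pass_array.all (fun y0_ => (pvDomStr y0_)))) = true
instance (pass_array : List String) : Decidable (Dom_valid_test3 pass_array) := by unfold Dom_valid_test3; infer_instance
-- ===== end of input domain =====

-- B replaces A's greedy last-char/reset toggle by a run-length decomposition (sum of run-length // 2); objective: simpler.


-- ===== PORT A =====
-- one step of A's loop body: state = (last_char, dvojic)
def stepA (s : Option String × Int) (x : String) : Option String × Int :=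
  if s.1 = some x then (none, s.2 + 1) else (some x, s.2)

def valid_test3 (pass_array : List String) : Bool :=
  (pass_array.foldl stepA (none, 0)).2 > 1

-- ===== PORT B =====
-- count_runs: the inner while-scan is the takeWhile length, xs[i:] is the dropWhile remainder
def countRuns : List String → Int
  | [] => 0
  | x :: xs =>
      (1 + ((xs.takeWhile (fun y => y = x)).length : Int)) / 2
        + countRuns (xs.dropWhile (fun y => y = x))
termination_by l => l.length
decreasing_by
  simp only [List.length_cons]
  exact Nat.lt_succ_of_le (List.length_dropWhile_le _ _)

def valid_test3_alt (pass_array : List String) : Bool :=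
  countRuns pass_array > 1

-- ===== PRECONDITION & SPEC =====
def Spec_valid_test3 (pass_array : List String) (out : Bool) : Prop := out = valid_test3_alt pass_array
instance (pass_array : List String) (out : Bool) : Decidable (Spec_valid_test3 pass_array out) := by unfold Spec_valid_test3; infer_instance

-- ===== CLAIM (what is proved, stated in full; the proofs are below) =====
def Claim_equal_valid_test3 : Prop := ∀ (pass_array : List String), Dom_valid_test3 pass_array → Spec_valid_test3 pass_array (valid_test3 pass_array)

-- ===== LEMMAS AND PROOFS =====

-- splitting off a (possibly empty) run of x from the front does not change the run count
lemma countRuns_split (x : String) (ys : List String) :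
    countRuns ys
      = ((ys.takeWhile (fun y => y = x)).length : Int) / 2
        + countRuns (ys.dropWhile (fun y => y = x)) := by
  cases ys with
  | nil => simp [countRuns]
  | cons z zs =>
    by_cases h : z = x
    · subst h
      simp [countRuns, List.dropWhile_cons]
      omega
    · simp [List.takeWhile_cons, List.dropWhile_cons, h]

-- the fold of A's loop body counts exactly the runs' pairs, from either reachable state
lemma fold_countRuns (xs : List String) :
    (∀ d : Int, (xs.foldl stepA (none, d)).2 = d + countRuns xs) ∧
    (∀ (x : String) (d : Int), (xs.foldl stepA (some x, d)).2 =
        d + (1 + ((xs.takeWhile (fun y => y = x)).length : Int)) / 2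
          + countRuns (xs.dropWhile (fun y => y = x))) := by
  induction xs with
  | nil =>
    constructor
    · intro d; simp [countRuns]
    · intro x d; simp [countRuns]
  | cons y ys ih =>
    obtain ⟨ih1, ih2⟩ := ih
    constructor
    · intro d
      have : stepA (none, d) y = (some y, d) := by simp [stepA]
      rw [List.foldl_cons, this, ih2 y d]
      simp [countRuns]
      omega
    · intro x d
      by_cases h : x = y
      · subst h
        have : stepA (some x, d) x = (none, d + 1) := by simp [stepA]
        rw [List.foldl_cons, this, ih1 (d + 1)]
        rw [countRuns_split x ys]
        simp [List.takeWhile_cons, List.dropWhile_cons]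
        have hnn : (0:Int) ≤ ((ys.takeWhile (fun y => y = x)).length : Int) := by positivity
        omega
      · have hyx : ¬ y = x := fun hc => h hc.symm
        have hst : stepA (some x, d) y = (some y, d) := by simp [stepA, h]
        rw [List.foldl_cons, hst, ih2 y d]
        simp [List.takeWhile_cons, List.dropWhile_cons, hyx, countRuns]
        omega

-- ===== VERDICT (by name: the statement is the Claim_ definition above) =====
theorem valid_test3_spec : Claim_equal_valid_test3 := by
  intro l _
  unfold Spec_valid_test3 valid_test3 valid_test3_alt
  rw [(fold_countRuns l).1 0]
  simp
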